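-- pv_equiv track=rewrite | github.com/mfethe1/options-optimizer | src/agents/swarm/agents/options_strategist.py | _analyze_current_positions
-- ===== SOURCE A (Python) =====
-- from typing import Dict, Any, List
--
-- def _analyze_current_positions(portfolio_data: Dict[str, Any]) -> Dict[str, Any]:
--     """Analyze current option positions"""
--     positions = portfolio_data.get('positions', [])
--     option_positions = [p for p in positions if p.get('asset_type') == 'option']
--
--     return {
--         'total_options': len(option_positions),
--         'calls': len([p for p in option_positions if p.get('option_type') == 'call']),
--         'puts': len([p for p in option_positions if p.get('option_type') == 'put'])
--     }
-- ===== SOURCE B (Python) =====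
-- def _analyze_current_positions(portfolio_data):
--     """Analyze current option positions via a tally dict keyed by option_type."""
--     tally = {}
--     for p in portfolio_data.get('positions', []):
--         if p.get('asset_type') == 'option':
--             k = p.get('option_type')
--             tally[k] = tally.get(k, 0) + 1
--     return {
--         'total_options': sum(tally.values()),
--         'calls': tally.get('call', 0),
--         'puts': tally.get('put', 0),
--     }
-- ===== Notes on version B (the rewrite author's own statement) =====
-- stated objective: alternative
-- what changed: Replaced the filter-into-a-list plus three counting comprehensions by building a single frequency dictionary keyed by option_type in one pass, from which calls/puts are dictionary lookups and the total is the sum of the tallies.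
import Mathlib
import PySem

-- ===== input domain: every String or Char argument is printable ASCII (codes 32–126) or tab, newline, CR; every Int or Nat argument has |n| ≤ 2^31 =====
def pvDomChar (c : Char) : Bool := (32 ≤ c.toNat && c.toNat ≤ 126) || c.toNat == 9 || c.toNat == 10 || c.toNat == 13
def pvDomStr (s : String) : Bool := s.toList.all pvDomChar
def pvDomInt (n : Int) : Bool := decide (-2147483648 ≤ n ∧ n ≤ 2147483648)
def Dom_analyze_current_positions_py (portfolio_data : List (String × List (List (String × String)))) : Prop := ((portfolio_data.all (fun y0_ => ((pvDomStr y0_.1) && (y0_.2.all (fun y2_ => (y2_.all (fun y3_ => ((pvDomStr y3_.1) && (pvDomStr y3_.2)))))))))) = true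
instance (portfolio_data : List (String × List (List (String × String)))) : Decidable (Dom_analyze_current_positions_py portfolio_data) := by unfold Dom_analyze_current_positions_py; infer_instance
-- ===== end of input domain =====

-- B replaces A's filter-plus-three-comprehensions by one pass building a frequency dictionary keyed by option_type, from which the three answers are read off (alternative decomposition, same cost).


-- ===== PORT A =====
def analyze_current_positions_py (portfolio_data : List (String × List (List (String × String)))) : List (String × Int) :=
  let positions := (PySem.Dict.mk portfolio_data).getD "positions" []
  let option_positions := positions.filter (fun p => (PySem.Dict.mk p).get? "asset_type" == some "option")
  [("total_options", (option_positions.length : Int)),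
   ("calls", ((option_positions.filter (fun p => (PySem.Dict.mk p).get? "option_type" == some "call")).length : Int)),
   ("puts", ((option_positions.filter (fun p => (PySem.Dict.mk p).get? "option_type" == some "put")).length : Int))]

-- ===== PORT B =====
-- Source B's loop: tally[k] = tally.get(k, 0) + 1 with k = p.get('option_type') (None possible → Option String keys)
def analyze_current_positions_py_alt (portfolio_data : List (String × List (List (String × String)))) : List (String × Int) :=
  let positions := (PySem.Dict.mk portfolio_data).getD "positions" []
  let tally := positions.foldl
    (fun d p =>
      if (PySem.Dict.mk p).get? "asset_type" == some "option" then
        d.insert ((PySem.Dict.mk p).get? "option_type")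
                 (d.getD ((PySem.Dict.mk p).get? "option_type") 0 + 1)
      else d)
    (PySem.Dict.empty : PySem.Dict (Option String) Int)
  [("total_options", tally.values.sum),
   ("calls", tally.getD (some "call") 0),
   ("puts", tally.getD (some "put") 0)]

-- ===== PRECONDITION & SPEC =====
def Spec_analyze_current_positions_py (portfolio_data : List (String × List (List (String × String)))) (out : List (String × Int)) : Prop := out = analyze_current_positions_py_alt portfolio_data
instance (portfolio_data : List (String × List (List (String × String)))) (out : List (String × Int)) : Decidable (Spec_analyze_current_positions_py portfolio_data out) := by unfold Spec_analyze_current_positions_py; infer_instance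

-- ===== CLAIM (what is proved, stated in full; the proofs are below) =====
def Claim_equal_analyze_current_positions_py : Prop := ∀ (portfolio_data : List (String × List (List (String × String)))), Dom_analyze_current_positions_py portfolio_data → Spec_analyze_current_positions_py portfolio_data (analyze_current_positions_py portfolio_data)

-- ===== LEMMAS AND PROOFS =====

-- B's guarded fold is the Counter of the option_type keys of the filtered positions
lemma tally_eq_counter (positions : List (List (String × String))) :
    positions.foldl
      (fun d p =>
        if (PySem.Dict.mk p).get? "asset_type" == some "option" then
          d.insert ((PySem.Dict.mk p).get? "option_type")
                   (d.getD ((PySem.Dict.mk p).get? "option_type") 0 + 1)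
        else d)
      (PySem.Dict.empty : PySem.Dict (Option String) Int)
    = PySem.Dict.counter
        ((positions.filter (fun p => (PySem.Dict.mk p).get? "asset_type" == some "option")).map
          (fun p => (PySem.Dict.mk p).get? "option_type")) := by
  rw [← PySem.Dict.foldl_insert_getD_add_one_eq_counter, List.foldl_map, List.foldl_filter]

-- summing a Counter's values gives the length of the counted list
lemma sum_values_counter (xs : List (Option String)) :
    (PySem.Dict.counter xs).values.sum = (xs.length : Int) := by
  have h1 : (PySem.Dict.counter xs).values
      = (PySem.Set.ofList xs).map (fun k => (xs.count k : Int)) := by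
    simp [PySem.Dict.values, PySem.Dict.items_counter]
  have hperm : (PySem.Set.ofList xs : List (Option String)).Perm xs.dedup :=
    (List.perm_ext_iff_of_nodup (PySem.Set.nodup_ofList xs) xs.nodup_dedup).mpr
      (by intro a; simp [PySem.Set.mem_ofList, List.mem_dedup])
  rw [h1, ((hperm.map (fun k => (xs.count k : Int)))).sum_eq]
  have h2 : (xs.dedup.map (fun k => (xs.count k : Int))).sum
      = ((xs.dedup.map (fun k => xs.count k)).sum : Int) := by
    rw [Nat.cast_list_sum, List.map_map]; rfl
  rw [h2]
  have h3 : (fun k => @List.count (Option String) Option.instBEq k xs)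
      = (fun k => @List.count (Option String) instBEqOfDecidableEq k xs) := by
    funext k
    simp only [List.count_eq_countP]
    exact List.countP_congr (by intro x _; simp [beq_eq_decide])
  rw [h3]
  exact_mod_cast congrArg (Nat.cast : Nat → Int) (List.sum_map_count_dedup_eq_length xs)

-- a Counter lookup is the count of option positions with that option_type
lemma getD_counter_key (ps : List (List (String × String))) (v : Option String) :
    (PySem.Dict.counter (ps.map (fun p => (PySem.Dict.mk p).get? "option_type"))).getD v 0
    = ((ps.filter (fun p => (PySem.Dict.mk p).get? "option_type" == v)).length : Int) := by
  rw [PySem.Dict.getD_counter]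
  congr 1
  rw [List.count_eq_countP, List.countP_map, List.countP_eq_length_filter]
  rfl

-- ===== VERDICT (by name: the statement is the Claim_ definition above) =====
theorem analyze_current_positions_py_spec : Claim_equal_analyze_current_positions_py := by
  intro pd _
  unfold Spec_analyze_current_positions_py analyze_current_positions_py analyze_current_positions_py_alt
  simp only [tally_eq_counter, sum_values_counter, getD_counter_key, List.length_map]
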